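-- pv_equiv track=rewrite | github.com/djcomidi/advent-of-code | day05.py | is_nice_a
-- ===== SOURCE A (Python) =====
-- def is_nice_a(w):
--     # It does not contain the strings ab, cd, pq, or xy
--     if any(sub in w for sub in ['ab', 'cd', 'pq', 'xy']):
--         return False
--     # It contains at least three vowels (aeiou only)
--     if sum(w.count(vowel) for vowel in 'aeiou') < 3:
--         return False
--     # It contains at least one letter that appears twice in a row
--     doubles = 0
--     for i in range(len(w)-1):
--         doubles += 1 if w[i] == w[i+1] else 0
--     return doubles > 0
-- ===== SOURCE B (Python) =====
-- FORBIDDEN = {('a', 'b'), ('c', 'd'), ('p', 'q'), ('x', 'y')}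
--
-- def is_nice_a(w):
--     # single combined pass: pairwise scan with a vowel counter and a double flag
--     vowels = 0
--     has_double = False
--     for c, d in zip(w, w[1:]):
--         if c in 'aeiou':
--             vowels += 1
--         if (c, d) in FORBIDDEN:
--             return False
--         if c == d:
--             has_double = True
--     if w and w[-1] in 'aeiou':
--         vowels += 1
--     return vowels >= 3 and has_double
-- ===== Notes on version B (the rewrite author's own statement) =====
-- stated objective: alternative
-- what changed: Replaces A's three separate traversals (four substring searches, five count passes, an index loop over range) with one single pairwise zip pass that maintains a vowel counter and a double flag and returns early on a forbidden pair; still O(n), not faster in CPython since A's passes run in C.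
import Mathlib
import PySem

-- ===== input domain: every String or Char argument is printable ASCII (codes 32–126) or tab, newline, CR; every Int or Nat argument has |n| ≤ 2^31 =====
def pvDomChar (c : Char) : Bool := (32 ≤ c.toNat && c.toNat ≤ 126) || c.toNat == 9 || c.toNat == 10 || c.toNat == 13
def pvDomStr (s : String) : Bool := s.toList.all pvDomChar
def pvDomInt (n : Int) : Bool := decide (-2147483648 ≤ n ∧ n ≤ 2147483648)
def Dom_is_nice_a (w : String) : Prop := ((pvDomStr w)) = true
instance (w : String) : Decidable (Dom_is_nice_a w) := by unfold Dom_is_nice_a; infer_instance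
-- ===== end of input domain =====

-- B: one combined pairwise pass (vowel counter + double flag + early exit on forbidden pair) instead of A's three separate scans; same results, no speed claim.

-- ===== PORT A =====
-- literal transliteration of A: three separate checks in A's order
def is_nice_a (w : String) : Bool :=
  -- any(sub in w for sub in ['ab','cd','pq','xy'])
  if ["ab", "cd", "pq", "xy"].any (fun sub => PySem.Str.isIn sub w) then false
  -- sum(w.count(vowel) for vowel in 'aeiou') < 3
  else if (("aeiou".toList).map (fun v => (PySem.Chars.count w.toList [v] : Int))).sum < 3 then false
  else
    -- doubles loop over range(len(w)-1)
    let doubles := (PySem.List.pyRange 0 (PySem.Str.len w - 1) 1).foldl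
      (fun acc i => acc + if PySem.List.pyGetD w.toList i ' ' == PySem.List.pyGetD w.toList (i + 1) ' ' then (1 : Int) else 0) 0
    decide (doubles > 0)

-- ===== PORT B =====
def pvForbidden : List (Char × Char) := [('a', 'b'), ('c', 'd'), ('p', 'q'), ('x', 'y')]

-- the `for c, d in zip(w, w[1:])` loop with early return, plus the trailing last-vowel check
def pvAltLoop : List Char → Int → Bool → Bool
  | [], vowels, hasDouble => decide (3 ≤ vowels) && hasDouble
  | [c], vowels, hasDouble =>
      decide (3 ≤ (if ("aeiou".toList).contains c then vowels + 1 else vowels)) && hasDouble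
  | c :: d :: rest, vowels, hasDouble =>
      let vowels' := if ("aeiou".toList).contains c then vowels + 1 else vowels
      if pvForbidden.contains (c, d) then false
      else pvAltLoop (d :: rest) vowels' (if c == d then true else hasDouble)

def is_nice_a_alt (w : String) : Bool := pvAltLoop w.toList 0 false

-- ===== PRECONDITION & SPEC =====
def Spec_is_nice_a (w : String) (out : Bool) : Prop := out = is_nice_a_alt w
instance (w : String) (out : Bool) : Decidable (Spec_is_nice_a w out) := by unfold Spec_is_nice_a; infer_instance

-- ===== CLAIM (what is proved, stated in full; the proofs are below) =====
def Claim_equal_is_nice_a : Prop := ∀ (w : String), Dom_is_nice_a w → Spec_is_nice_a w (is_nice_a w)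

-- ===== LEMMAS AND PROOFS =====

-- the adjacent pairs of a char list
def pvPairs (cs : List Char) : List (Char × Char) := cs.zip cs.tail

def pvIsV (c : Char) : Bool := ("aeiou".toList).contains c
def pvDbl (p : Char × Char) : Bool := p.1 == p.2
def pvFb (p : Char × Char) : Bool := pvForbidden.contains p

lemma pvPairs_cons2 (c d : Char) (r : List Char) :
    pvPairs (c :: d :: r) = (c, d) :: pvPairs (d :: r) := by
  simp [pvPairs]

-- B's loop computed in closed form
lemma alt_char : ∀ (cs : List Char) (v : Int) (dbl : Bool),
    pvAltLoop cs v dbl =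
      if (pvPairs cs).any pvFb then false
      else (decide (3 ≤ v + (cs.countP pvIsV : Int)) && (dbl || (pvPairs cs).any pvDbl)) := by
  intro cs
  induction cs with
  | nil => intro v dbl; simp [pvAltLoop, pvPairs]
  | cons c t ih =>
    intro v dbl
    cases t with
    | nil =>
      simp only [pvAltLoop, pvPairs, List.zip_nil_right, List.any_nil, if_neg Bool.false_ne_true,
        List.countP_cons, List.countP_nil, pvIsV]
      split <;> simp <;> congr 1 <;> simp <;> omega
    | cons d r =>
      simp only [pvAltLoop, pvPairs_cons2, List.any_cons]
      by_cases hfb : pvFb (c, d)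
      · simp [hfb, pvFb] at *
        simp [hfb]
      · have hfb' : pvForbidden.contains (c, d) = false := by
          simpa [pvFb] using hfb
        simp only [hfb', if_neg Bool.false_ne_true, ih, pvFb, hfb', Bool.false_or]
        have hcnt : (if ("aeiou".toList).contains c then v + 1 else v) +
            ((d :: r).countP pvIsV : Int) = v + (((c :: d :: r).countP pvIsV : Int)) := by
          simp only [List.countP_cons (p := pvIsV) (a := c) (l := d :: r), pvIsV]
          split <;> push_cast <;> omega
        rw [hcnt]
        cases hcd : (c == d) <;> cases dbl <;> simp [pvDbl, hcd]

-- [a, b] is an infix iff (a, b) is an adjacent pair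
lemma infix_pair (a b : Char) : ∀ (cs : List Char),
    ([a, b] <:+: cs) ↔ (a, b) ∈ pvPairs cs := by
  intro cs
  induction cs with
  | nil => simp [pvPairs]
  | cons c t ih =>
    rw [List.infix_cons_iff, ih]
    cases t with
    | nil => simp [pvPairs, List.prefix_cons_iff]
    | cons d r => simp [pvPairs_cons2, List.cons_prefix_cons, pvPairs, and_comm]

-- PySem.Chars.count with a single-char needle is List.count
lemma go_single (v : Char) : ∀ (fuel : Nat) (l : List Char) (acc : Nat), l.length ≤ fuel →
    PySem.Chars.count.go [v] fuel l acc = acc + l.count v := by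
  intro fuel
  induction fuel with
  | zero =>
    intro l acc h
    cases l with
    | nil => simp [PySem.Chars.count.go]
    | cons c t => simp at h
  | succ n ih =>
    intro l acc h
    cases l with
    | nil => simp [PySem.Chars.count.go]
    | cons c t =>
      simp only [PySem.Chars.count.go]
      by_cases hv : v = c
      · subst hv
        simp [List.isPrefixOf, ih t (acc + 1) (by simpa using h), List.count_cons]
        omega
      · simp [List.isPrefixOf, hv, ih t acc (by simpa using h), Ne.symm hv]

lemma count_single (cs : List Char) (v : Char) :
    PySem.Chars.count cs [v] = cs.count v := by
  simpa [PySem.Chars.count] using go_single v cs.length cs 0 le_rfl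

-- one char contributes 1 to the vowel sum iff it is a vowel
lemma vowel_point (c : Char) :
    ((("aeiou".toList)).map (fun v => if c = v then (1 : Int) else 0)).sum
      = if pvIsV c then 1 else 0 := by
  by_cases h : c ∈ "aeiou".toList
  · have h' : c ∈ ['a', 'e', 'i', 'o', 'u'] := h
    fin_cases h' <;> decide
  · have h1 : pvIsV c = false := by simpa [pvIsV] using h
    simp only [show "aeiou".toList = ['a', 'e', 'i', 'o', 'u'] from rfl] at h
    simp at h
    obtain ⟨n1, n2, n3, n4, n5⟩ := h
    simp [h1, n1, n2, n3, n4, n5]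

-- the five count passes sum to one countP
lemma vowel_sum : ∀ (cs : List Char),
    ((("aeiou".toList)).map (fun v => (cs.count v : Int))).sum = (cs.countP pvIsV : Int) := by
  intro cs
  induction cs with
  | nil => simp
  | cons c t ih =>
    have expand : (("aeiou".toList)).map (fun v => ((c :: t).count v : Int))
        = (("aeiou".toList)).map (fun v => (t.count v : Int) + if c = v then 1 else 0) := by
      apply List.map_congr_left
      intro v _
      by_cases hv : c = v
      · subst hv; simp [List.count_cons]
      · simp [List.count_cons, hv, Ne.symm hv]
    rw [expand]
    rw [PySem.List.sum_map_add_int, ih, vowel_point c, List.countP_cons]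
    split <;> push_cast <;> omega

-- the index loop counts the equal adjacent pairs
lemma dbl_sum : ∀ (cs : List Char),
    ((List.range (cs.length - 1)).map (fun k : Nat =>
        if PySem.List.pyGetD cs (k : Int) ' ' == PySem.List.pyGetD cs ((k : Int) + 1) ' '
        then (1 : Int) else 0)).sum
      = ((pvPairs cs).countP pvDbl : Int) := by
  intro cs
  induction cs with
  | nil => simp [pvPairs]
  | cons c t ih =>
    cases t with
    | nil => simp [pvPairs]
    | cons d r =>
      have hlen : (c :: d :: r).length - 1 = (d :: r).length - 1 + 1 := by
        simp
      rw [hlen, List.range_succ_eq_map, List.map_cons, List.map_map]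
      have h0 : (if PySem.List.pyGetD (c :: d :: r) ((0 : Nat) : Int) ' ' ==
            PySem.List.pyGetD (c :: d :: r) (((0 : Nat) : Int) + 1) ' ' then (1 : Int) else 0)
          = if pvDbl (c, d) then (1 : Int) else 0 := by
        have e1 : (((0 : Nat) : Int) + 1) = ((1 : Nat) : Int) := by norm_num
        rw [e1, PySem.List.pyGetD_natCast, PySem.List.pyGetD_natCast]
        rfl
      have hsucc : ∀ k : Nat,
          (if PySem.List.pyGetD (c :: d :: r) ((k.succ : Nat) : Int) ' ' ==
              PySem.List.pyGetD (c :: d :: r) (((k.succ : Nat) : Int) + 1) ' ' then (1 : Int) else 0)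
          = if PySem.List.pyGetD (d :: r) ((k : Nat) : Int) ' ' ==
              PySem.List.pyGetD (d :: r) (((k : Nat) : Int) + 1) ' ' then (1 : Int) else 0 := by
        intro k
        have e1 : ((k.succ : Nat) : Int) = (((k + 1 : Nat)) : Int) := rfl
        have e2 : (((k.succ : Nat) : Int) + 1) = (((k + 2 : Nat)) : Int) := by push_cast; ring
        have e3 : (((k : Nat) : Int) + 1) = (((k + 1 : Nat)) : Int) := by push_cast; ring
        rw [e1, e2, e3, PySem.List.pyGetD_natCast, PySem.List.pyGetD_natCast,
          PySem.List.pyGetD_natCast, PySem.List.pyGetD_natCast,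
          List.getD_cons_succ, List.getD_cons_succ]
      rw [List.sum_cons, h0]
      have hmap : ((fun k : Nat =>
            if PySem.List.pyGetD (c :: d :: r) ((k : Nat) : Int) ' ' ==
                PySem.List.pyGetD (c :: d :: r) (((k : Nat) : Int) + 1) ' ' then (1 : Int) else 0) ∘ Nat.succ)
          = (fun k : Nat =>
            if PySem.List.pyGetD (d :: r) ((k : Nat) : Int) ' ' ==
                PySem.List.pyGetD (d :: r) (((k : Nat) : Int) + 1) ' ' then (1 : Int) else 0) := by
        funext k
        simpa [Function.comp] using hsucc k
      rw [hmap, ih, pvPairs_cons2, List.countP_cons]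
      split <;> push_cast <;> omega

-- ===== VERDICT (by name: the statement is the Claim_ definition above) =====
-- A's three conditions rewritten over pvPairs / countP
lemma forb_eq (w : String) :
    (["ab", "cd", "pq", "xy"].any (fun sub => PySem.Str.isIn sub w))
      = (pvPairs w.toList).any pvFb := by
  rw [Bool.eq_iff_iff]
  simp only [List.any_eq_true, List.mem_cons, List.not_mem_nil, or_false,
    PySem.Str.isIn_iff_infix, pvFb, pvForbidden, List.contains_eq_mem, decide_eq_true_eq,
    Prod.mk.injEq, show "ab".toList = ['a', 'b'] from rfl, show "cd".toList = ['c', 'd'] from rfl,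
    show "pq".toList = ['p', 'q'] from rfl, show "xy".toList = ['x', 'y'] from rfl]
  constructor
  · rintro ⟨sub, hsub, hinf⟩
    rcases hsub with rfl | rfl | rfl | rfl <;>
      [exact ⟨('a', 'b'), (infix_pair 'a' 'b' _).1 hinf, by simp⟩;
       exact ⟨('c', 'd'), (infix_pair 'c' 'd' _).1 hinf, by simp⟩;
       exact ⟨('p', 'q'), (infix_pair 'p' 'q' _).1 hinf, by simp⟩;
       exact ⟨('x', 'y'), (infix_pair 'x' 'y' _).1 hinf, by simp⟩]
  · rintro ⟨⟨a, b⟩, hmem, hp⟩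
    rcases hp with ⟨rfl, rfl⟩ | ⟨rfl, rfl⟩ | ⟨rfl, rfl⟩ | ⟨rfl, rfl⟩ <;>
      [exact ⟨"ab", by simp, (infix_pair _ _ _).2 hmem⟩;
       exact ⟨"cd", by simp, (infix_pair _ _ _).2 hmem⟩;
       exact ⟨"pq", by simp, (infix_pair _ _ _).2 hmem⟩;
       exact ⟨"xy", by simp, (infix_pair _ _ _).2 hmem⟩]

lemma cnt_eq (w : String) :
    ((("aeiou".toList)).map (fun v => (PySem.Chars.count w.toList [v] : Int))).sum
      = (w.toList.countP pvIsV : Int) := by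
  simp only [count_single]
  exact vowel_sum w.toList

lemma dbl_eq (w : String) :
    (PySem.List.pyRange 0 (PySem.Str.len w - 1) 1).foldl
      (fun acc i => acc + if PySem.List.pyGetD w.toList i ' ' == PySem.List.pyGetD w.toList (i + 1) ' '
        then (1 : Int) else 0) 0
      = ((pvPairs w.toList).countP pvDbl : Int) := by
  rw [PySem.List.foldl_add, zero_add, PySem.Str.len_eq]
  rcases hcs : w.toList with _ | ⟨c, t⟩
  · norm_num [pvPairs, show PySem.List.pyRange 0 (-1) 1 = [] from rfl]
  · have e : (((c :: t).length : Nat) : Int) - 1 = ((t.length : Nat) : Int) := by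
      simp
    rw [e, PySem.List.pyRange_zero_natCast, List.map_map]
    simpa [Function.comp_def] using dbl_sum (c :: t)

theorem is_nice_a_spec : Claim_equal_is_nice_a := by
  intro w _
  show is_nice_a w = is_nice_a_alt w
  unfold is_nice_a is_nice_a_alt
  rw [alt_char, forb_eq, cnt_eq, dbl_eq]
  by_cases h1 : ((pvPairs w.toList).any pvFb) = true
  · simp [h1]
  · rw [if_neg h1, if_neg h1]
    by_cases h2 : ((w.toList.countP pvIsV : Int) < 3)
    · rw [if_pos h2]
      have hd : decide (3 ≤ (0 : Int) + (w.toList.countP pvIsV : Int)) = false :=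
        decide_eq_false (by omega)
      rw [hd, Bool.false_and]
    · rw [if_neg h2]
      have hd : decide (3 ≤ (0 : Int) + (w.toList.countP pvIsV : Int)) = true :=
        decide_eq_true (by omega)
      rw [hd, Bool.true_and, Bool.false_or, Bool.eq_iff_iff]
      simp only [decide_eq_true_eq, List.any_eq_true, gt_iff_lt, Int.natCast_pos,
        List.countP_pos_iff]
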